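-- pv_equiv track=rewrite | github.com/mark1ry/adventofcode_2023 | day_10/pipes.py | extend_sketch
-- ===== SOURCE A (Python) =====
-- def check_horizontal(sketch, row, column):
--     left = sketch[row][column]
--     right = sketch[row][column+1]
--     if((left=="L" or left=="F" or left=="-" or left=="S") and (right=="J" or right=="7" or right=="-" or right=="S")):
--         return "-"
--     return "."
--
-- def check_vertical(sketch, row, column):
--     top = sketch[row][column]
--     bottom = sketch[row+1][column]
--     if((top=="7" or top=="F" or top=="|" or top=="S") and (bottom=="J" or bottom=="L" or bottom=="|" or bottom=="S")):
--         return "|"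
--     return "."
--
-- def extend_sketch(sketch):
--     extended_sketch = [["%" for element in range(2*len(sketch[0])-1)] for line in range(2*len(sketch)-1)]
--     for row in range(len(sketch)):
--         for column in range(len(sketch[row])):
--             extended_sketch[2*row][2*column] = sketch[row][column]
--     for row in range(len(sketch)-1):
--         for column in range(len(sketch[row])-1):
--             extended_sketch[1+2*row][1+2*column] = "."
--     for row in range(len(sketch)):
--         for column in range(len(sketch[row])-1):
--             extended_sketch[2*row][1+2*column] = check_horizontal(sketch, row, column)
--     for row in range(len(sketch)-1):
--         for column in range(len(sketch[row])):
--             extended_sketch[1+2*row][2*column] = check_vertical(sketch, row, column)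
--     return extended_sketch
-- ===== SOURCE B (Python) =====
-- def extend_sketch(sketch):
--     def hconn(a, b):
--         return "-" if a in ("L", "F", "-", "S") and b in ("J", "7", "-", "S") else "."
--
--     def vconn(t, b):
--         return "|" if t in ("7", "F", "|", "S") and b in ("J", "L", "|", "S") else "."
--
--     def expand_row(row):
--         out = [row[0]]
--         for a, b in zip(row, row[1:]):
--             out += [hconn(a, b), b]
--         return out
--
--     def link_rows(top, bot):
--         out = [vconn(top[0], bot[0])]
--         for t, b in zip(top[1:], bot[1:]):
--             out += [".", vconn(t, b)]
--         return out
--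
--     result = [expand_row(sketch[0])]
--     for top, bot in zip(sketch, sketch[1:]):
--         result += [link_rows(top, bot), expand_row(bot)]
--     return result
-- ===== Notes on version B (the rewrite author's own statement) =====
-- stated objective: alternative
-- what changed: B never builds or mutates a pre-sized grid and uses no index arithmetic: it assembles the result structurally by zipping each row with its own tail (interleaving cells with horizontal connectors) and zipping the sketch with its tail (emitting a vertical-connector row between each adjacent pair of expanded rows), instead of A's four index-driven write passes into a '%'-filled 2D array.
-- outside the precondition, e.g. on extend_sketch([]): A returns [], B raises IndexError; on extend_sketch([[], []]): A returns [[], [], []], B raises IndexError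
import Mathlib
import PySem

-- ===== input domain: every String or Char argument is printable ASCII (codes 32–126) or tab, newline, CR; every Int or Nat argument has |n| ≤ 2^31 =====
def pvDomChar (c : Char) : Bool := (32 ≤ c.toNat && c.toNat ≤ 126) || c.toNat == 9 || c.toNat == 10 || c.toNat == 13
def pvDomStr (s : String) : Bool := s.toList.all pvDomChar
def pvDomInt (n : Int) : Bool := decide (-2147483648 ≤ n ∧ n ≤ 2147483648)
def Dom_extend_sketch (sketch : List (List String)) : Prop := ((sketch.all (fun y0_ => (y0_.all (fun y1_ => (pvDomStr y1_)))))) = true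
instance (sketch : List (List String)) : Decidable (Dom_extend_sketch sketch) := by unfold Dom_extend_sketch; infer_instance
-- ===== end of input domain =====

-- B assembles the expanded grid structurally by zipping rows with their tails (no pre-sized
-- mutable grid, no index arithmetic), instead of A's four index-driven write passes (objective: alternative).

-- ===== PORT A =====
-- 2-d read sketch[r][c] (total; Pre_ keeps all reads in range, so the default is never seen)
def pvGet2 (g : List (List String)) (r c : Nat) : String := (g.getD r []).getD c ""
-- 2-d write g[r][c] = v (List.set is a no-op out of range; Pre_ keeps all writes in range)
def pvSet2 (g : List (List String)) (r c : Nat) (v : String) : List (List String) :=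
  g.set r ((g.getD r []).set c v)
-- len(sketch[r])
def pvRlen (g : List (List String)) (r : Nat) : Nat := (g.getD r []).length

def check_horizontal (sketch : List (List String)) (row column : Nat) : String :=
  let left := pvGet2 sketch row column
  let right := pvGet2 sketch row (column + 1)
  if (left = "L" ∨ left = "F" ∨ left = "-" ∨ left = "S") ∧
     (right = "J" ∨ right = "7" ∨ right = "-" ∨ right = "S") then "-" else "."

def check_vertical (sketch : List (List String)) (row column : Nat) : String :=
  let top := pvGet2 sketch row column
  let bottom := pvGet2 sketch (row + 1) column
  if (top = "7" ∨ top = "F" ∨ top = "|" ∨ top = "S") ∧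
     (bottom = "J" ∨ bottom = "L" ∨ bottom = "|" ∨ bottom = "S") then "|" else "."

def extend_sketch (sketch : List (List String)) : List (List String) :=
  let e0 := List.replicate (2 * sketch.length - 1) (List.replicate (2 * pvRlen sketch 0 - 1) "%")
  let e1 := (List.range sketch.length).foldl (fun g row =>
      (List.range (pvRlen sketch row)).foldl (fun g column =>
        pvSet2 g (2 * row) (2 * column) (pvGet2 sketch row column)) g) e0
  let e2 := (List.range (sketch.length - 1)).foldl (fun g row =>
      (List.range (pvRlen sketch row - 1)).foldl (fun g column =>
        pvSet2 g (1 + 2 * row) (1 + 2 * column) ".") g) e1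
  let e3 := (List.range sketch.length).foldl (fun g row =>
      (List.range (pvRlen sketch row - 1)).foldl (fun g column =>
        pvSet2 g (2 * row) (1 + 2 * column) (check_horizontal sketch row column)) g) e2
  let e4 := (List.range (sketch.length - 1)).foldl (fun g row =>
      (List.range (pvRlen sketch row)).foldl (fun g column =>
        pvSet2 g (1 + 2 * row) (2 * column) (check_vertical sketch row column)) g) e3
  e4

-- ===== PORT B =====
def hconn (a b : String) : String :=
  if (a = "L" ∨ a = "F" ∨ a = "-" ∨ a = "S") ∧
     (b = "J" ∨ b = "7" ∨ b = "-" ∨ b = "S") then "-" else "."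

def vconn (t b : String) : String :=
  if (t = "7" ∨ t = "F" ∨ t = "|" ∨ t = "S") ∧
     (b = "J" ∨ b = "L" ∨ b = "|" ∨ b = "S") then "|" else "."

-- out = [row[0]]; for a, b in zip(row, row[1:]): out += [hconn(a, b), b]
-- (row[0] raises on an empty row in Python; Pre_ keeps rows nonempty, so headD's default is never seen)
def expandRow (row : List String) : List String :=
  (row.zip row.tail).foldl (fun out p => out ++ [hconn p.1 p.2, p.2]) [row.headD ""]

-- out = [vconn(top[0], bot[0])]; for t, b in zip(top[1:], bot[1:]): out += [".", vconn(t, b)]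
def linkRows (top bot : List String) : List String :=
  (top.tail.zip bot.tail).foldl (fun out p => out ++ [".", vconn p.1 p.2])
    [vconn (top.headD "") (bot.headD "")]

-- result = [expand_row(sketch[0])]; for top, bot in zip(sketch, sketch[1:]): result += [link_rows(top, bot), expand_row(bot)]
def extend_sketch_alt (sketch : List (List String)) : List (List String) :=
  (sketch.zip sketch.tail).foldl (fun res p => res ++ [linkRows p.1 p.2, expandRow p.2])
    [expandRow (sketch.headD [])]

-- ===== PRECONDITION & SPEC =====
-- Pre_ excludes ragged sketches, on which A raises IndexError (a row longer or shorter than row 0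
-- forces an out-of-range read or write in one of A's four passes), and degenerate empty sketches /
-- sketches made of empty rows, where A happens to return [] resp. lists of empty rows (its
-- comprehension ranges are empty) but B's up-front row[0] / sketch[0] naturally raises IndexError.
def Pre_extend_sketch (sketch : List (List String)) : Prop :=
  sketch ≠ [] ∧ (sketch.headD []).length ≠ 0 ∧
    ∀ row ∈ sketch, row.length = (sketch.headD []).length
instance (sketch : List (List String)) : Decidable (Pre_extend_sketch sketch) := by
  unfold Pre_extend_sketch; infer_instance
def pvWitness_extend_sketch : List (List String) := [["S", "-"], ["|", "."]]

def Spec_extend_sketch (sketch : List (List String)) (out : List (List String)) : Prop := out = extend_sketch_alt sketch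
instance (sketch : List (List String)) (out : List (List String)) : Decidable (Spec_extend_sketch sketch out) := by unfold Spec_extend_sketch; infer_instance

-- ===== CLAIM (what is proved, stated in full; the proofs are below) =====
def Claim_equal_extend_sketch : Prop := ∀ (sketch : List (List String)), Dom_extend_sketch sketch → Pre_extend_sketch sketch → Spec_extend_sketch sketch (extend_sketch sketch)

-- ===== LEMMAS AND PROOFS =====

-- the common per-position value both programs compute, used only by the proofs
def pvCell (sketch : List (List String)) (r c : Nat) : String :=
  if r % 2 = 0 then
    if c % 2 = 0 then pvGet2 sketch (r / 2) (c / 2)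
    else hconn (pvGet2 sketch (r / 2) (c / 2)) (pvGet2 sketch (r / 2) (c / 2 + 1))
  else
    if c % 2 = 0 then vconn (pvGet2 sketch (r / 2) (c / 2)) (pvGet2 sketch (r / 2 + 1) (c / 2))
    else "."

-- ---------- A-side characterisation ----------

-- the position-indexed values each of A's four passes writes
def pvV1 (sketch : List (List String)) (r c : Nat) : String := pvGet2 sketch (r / 2) (c / 2)
def pvV3 (sketch : List (List String)) (r c : Nat) : String := check_horizontal sketch (r / 2) (c / 2)
def pvV4 (sketch : List (List String)) (r c : Nat) : String := check_vertical sketch (r / 2) (c / 2)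

-- a pass = fold of in-place writes, the value a function of the position
def pvWfold (V : Nat → Nat → String) (ps : List (Nat × Nat)) (g : List (List String)) : List (List String) :=
  ps.foldl (fun g p => pvSet2 g p.1 p.2 (V p.1 p.2)) g

def pvPairs (m n : Nat) (fr fc : Nat → Nat) : List (Nat × Nat) :=
  (List.range m).flatMap fun i => (List.range n).map fun j => (fr i, fc j)

lemma getD_set' {α : Type} (l : List α) (i j : Nat) (v d : α) :
    (l.set i v).getD j d = if i = j ∧ i < l.length then v else l.getD j d := by
  simp only [List.getD, List.getElem?_set]
  by_cases h : i = j
  · subst h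
    by_cases h2 : i < l.length
    · simp [h2]
    · simp [h2]
  · simp [h]

lemma length_set2 (g : List (List String)) (a b : Nat) (v : String) :
    (pvSet2 g a b v).length = g.length := by
  simp [pvSet2]

lemma rlen_set2 (g : List (List String)) (a b : Nat) (v : String) (i : Nat) :
    pvRlen (pvSet2 g a b v) i = pvRlen g i := by
  unfold pvRlen pvSet2
  rw [getD_set']
  split_ifs with h
  · rw [List.length_set, h.1]
  · rfl

lemma get2_set2 (g : List (List String)) (a b : Nat) (v : String) (r c : Nat) :
    pvGet2 (pvSet2 g a b v) r c =
      if a = r ∧ b = c ∧ a < g.length ∧ b < pvRlen g a then v else pvGet2 g r c := by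
  unfold pvGet2 pvSet2 pvRlen
  rw [getD_set']
  by_cases h1 : a = r ∧ a < g.length
  · rw [if_pos h1, getD_set']
    by_cases h2 : b = c ∧ b < (g.getD a []).length
    · rw [if_pos h2, if_pos ⟨h1.1, h2.1, h1.2, h2.2⟩]
    · rw [if_neg h2, if_neg, h1.1]
      rintro ⟨-, hb, -, hbl⟩
      exact h2 ⟨hb, hbl⟩
  · rw [if_neg h1, if_neg]
    rintro ⟨ha, -, hal, -⟩
    exact h1 ⟨ha, hal⟩

lemma wfold_length (V : Nat → Nat → String) (ps : List (Nat × Nat)) (g : List (List String)) :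
    (pvWfold V ps g).length = g.length := by
  induction ps generalizing g with
  | nil => rfl
  | cons p ps ih => simp [pvWfold, List.foldl_cons] at *; rw [ih]; exact length_set2 ..

lemma wfold_rlen (V : Nat → Nat → String) (ps : List (Nat × Nat)) (g : List (List String)) (i : Nat) :
    pvRlen (pvWfold V ps g) i = pvRlen g i := by
  induction ps generalizing g with
  | nil => rfl
  | cons p ps ih => simp [pvWfold, List.foldl_cons] at *; rw [ih]; exact rlen_set2 ..

lemma wfold_not_mem (V : Nat → Nat → String) (ps : List (Nat × Nat)) (g : List (List String))
    (r c : Nat) (h : (r, c) ∉ ps) :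
    pvGet2 (pvWfold V ps g) r c = pvGet2 g r c := by
  induction ps generalizing g with
  | nil => rfl
  | cons p ps ih =>
    simp only [pvWfold, List.foldl_cons] at *
    rw [ih _ (fun hx => h (List.mem_cons_of_mem _ hx)), get2_set2, if_neg]
    rintro ⟨h1, h2, -⟩
    exact h (by simp [← h1, ← h2])

lemma wfold_keeps (V : Nat → Nat → String) (ps : List (Nat × Nat)) (g : List (List String))
    (r c : Nat) (h : pvGet2 g r c = V r c) :
    pvGet2 (pvWfold V ps g) r c = V r c := by
  induction ps generalizing g with
  | nil => exact h
  | cons p ps ih =>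
    simp only [pvWfold, List.foldl_cons] at *
    apply ih
    rw [get2_set2]
    split_ifs with hcond
    · rw [hcond.1, hcond.2.1]
    · exact h

lemma wfold_mem (V : Nat → Nat → String) (ps : List (Nat × Nat)) (g : List (List String))
    (r c : Nat) (hm : (r, c) ∈ ps) (hr : r < g.length) (hc : c < pvRlen g r) :
    pvGet2 (pvWfold V ps g) r c = V r c := by
  induction ps generalizing g with
  | nil => simp at hm
  | cons p ps ih =>
    simp only [pvWfold, List.foldl_cons] at *
    rcases List.mem_cons.mp hm with hp | hp
    · apply wfold_keeps
      rw [get2_set2, ← hp, if_pos ⟨rfl, rfl, hr, hc⟩]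
    · exact ih _ hp (by rw [length_set2]; exact hr) (by rw [rlen_set2]; exact hc)

lemma mem_pairs (m n : Nat) (fr fc : Nat → Nat) (r c : Nat) :
    (r, c) ∈ pvPairs m n fr fc ↔ ∃ i < m, ∃ j < n, fr i = r ∧ fc j = c := by
  simp [pvPairs, List.mem_flatMap, List.mem_map, List.mem_range]

lemma loop_eq_wfold (m n : Nat) (fr fc : Nat → Nat) (V : Nat → Nat → String)
    (g : List (List String)) :
    (List.range m).foldl (fun g i => (List.range n).foldl
        (fun g j => pvSet2 g (fr i) (fc j) (V (fr i) (fc j))) g) g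
      = pvWfold V (pvPairs m n fr fc) g := by
  simp [pvWfold, pvPairs, List.foldl_flatMap, List.foldl_map]

lemma rlen_of_pre (sketch : List (List String)) (h : Pre_extend_sketch sketch)
    (i : Nat) (hi : i < sketch.length) : pvRlen sketch i = (sketch.headD []).length := by
  unfold pvRlen
  rw [List.getD_eq_getElem _ _ hi]
  exact h.2.2 _ (List.getElem_mem hi)

lemma loop1_eq (sketch : List (List String)) (h : Pre_extend_sketch sketch)
    (g : List (List String)) :
    (List.range sketch.length).foldl (fun g row =>
        (List.range (pvRlen sketch row)).foldl (fun g column =>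
          pvSet2 g (2 * row) (2 * column) (pvGet2 sketch row column)) g) g
      = pvWfold (pvV1 sketch) (pvPairs sketch.length ((sketch.headD []).length)
          (fun i => 2 * i) (fun j => 2 * j)) g := by
  rw [← loop_eq_wfold]
  apply List.foldl_ext
  intro g i hi
  rw [rlen_of_pre sketch h i (List.mem_range.mp hi)]
  apply List.foldl_ext
  intro g j _
  have h1 : 2 * i / 2 = i := by omega
  have h2 : 2 * j / 2 = j := by omega
  simp [pvV1, h1, h2]

lemma loop2_eq (sketch : List (List String)) (h : Pre_extend_sketch sketch)
    (g : List (List String)) :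
    (List.range (sketch.length - 1)).foldl (fun g row =>
        (List.range (pvRlen sketch row - 1)).foldl (fun g column =>
          pvSet2 g (1 + 2 * row) (1 + 2 * column) ".") g) g
      = pvWfold (fun _ _ => ".") (pvPairs (sketch.length - 1) ((sketch.headD []).length - 1)
          (fun i => 1 + 2 * i) (fun j => 1 + 2 * j)) g := by
  rw [← loop_eq_wfold]
  apply List.foldl_ext
  intro g i hi
  rw [rlen_of_pre sketch h i (by have := List.mem_range.mp hi; omega)]

lemma loop3_eq (sketch : List (List String)) (h : Pre_extend_sketch sketch)
    (g : List (List String)) :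
    (List.range sketch.length).foldl (fun g row =>
        (List.range (pvRlen sketch row - 1)).foldl (fun g column =>
          pvSet2 g (2 * row) (1 + 2 * column) (check_horizontal sketch row column)) g) g
      = pvWfold (pvV3 sketch) (pvPairs sketch.length ((sketch.headD []).length - 1)
          (fun i => 2 * i) (fun j => 1 + 2 * j)) g := by
  rw [← loop_eq_wfold]
  apply List.foldl_ext
  intro g i hi
  rw [rlen_of_pre sketch h i (List.mem_range.mp hi)]
  apply List.foldl_ext
  intro g j _
  have h1 : 2 * i / 2 = i := by omega
  have h2 : (1 + 2 * j) / 2 = j := by omega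
  simp [pvV3, h1, h2]

lemma loop4_eq (sketch : List (List String)) (h : Pre_extend_sketch sketch)
    (g : List (List String)) :
    (List.range (sketch.length - 1)).foldl (fun g row =>
        (List.range (pvRlen sketch row)).foldl (fun g column =>
          pvSet2 g (1 + 2 * row) (2 * column) (check_vertical sketch row column)) g) g
      = pvWfold (pvV4 sketch) (pvPairs (sketch.length - 1) ((sketch.headD []).length)
          (fun i => 1 + 2 * i) (fun j => 2 * j)) g := by
  rw [← loop_eq_wfold]
  apply List.foldl_ext
  intro g i hi
  rw [rlen_of_pre sketch h i (by have := List.mem_range.mp hi; omega)]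
  apply List.foldl_ext
  intro g j _
  have h1 : (1 + 2 * i) / 2 = i := by omega
  have h2 : 2 * j / 2 = j := by omega
  simp [pvV4, h1, h2]

lemma extend_sketch_eq_wfold (sketch : List (List String)) (h : Pre_extend_sketch sketch) :
    extend_sketch sketch =
      pvWfold (pvV4 sketch) (pvPairs (sketch.length - 1) ((sketch.headD []).length) (fun i => 1 + 2 * i) (fun j => 2 * j))
        (pvWfold (pvV3 sketch) (pvPairs sketch.length ((sketch.headD []).length - 1) (fun i => 2 * i) (fun j => 1 + 2 * j))
          (pvWfold (fun _ _ => ".") (pvPairs (sketch.length - 1) ((sketch.headD []).length - 1) (fun i => 1 + 2 * i) (fun j => 1 + 2 * j))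
            (pvWfold (pvV1 sketch) (pvPairs sketch.length ((sketch.headD []).length) (fun i => 2 * i) (fun j => 2 * j))
              (List.replicate (2 * sketch.length - 1) (List.replicate (2 * (sketch.headD []).length - 1) "%"))))) := by
  have hr0 : pvRlen sketch 0 = (sketch.headD []).length :=
    rlen_of_pre sketch h 0 (by rcases h with ⟨hne, -⟩; exact List.length_pos_of_ne_nil hne)
  simp only [extend_sketch, hr0]
  rw [loop1_eq sketch h, loop2_eq sketch h, loop3_eq sketch h, loop4_eq sketch h]

lemma gget_final (sketch : List (List String)) (h : Pre_extend_sketch sketch) (r c : Nat)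
    (hr : r < 2 * sketch.length - 1) (hc : c < 2 * (sketch.headD []).length - 1) :
    pvGet2 (extend_sketch sketch) r c = pvCell sketch r c := by
  rw [extend_sketch_eq_wfold sketch h]
  set R := sketch.length with hRdef
  set C := (sketch.headD []).length with hCdef
  set g0 : List (List String) := List.replicate (2 * R - 1) (List.replicate (2 * C - 1) "%") with hg0
  set g1 := pvWfold (pvV1 sketch) (pvPairs R C (fun i => 2 * i) (fun j => 2 * j)) g0 with hg1
  set g2 := pvWfold (fun _ _ => ".") (pvPairs (R - 1) (C - 1) (fun i => 1 + 2 * i) (fun j => 1 + 2 * j)) g1 with hg2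
  set g3 := pvWfold (pvV3 sketch) (pvPairs R (C - 1) (fun i => 2 * i) (fun j => 1 + 2 * j)) g2 with hg3
  have hlen0 : g0.length = 2 * R - 1 := by rw [hg0, List.length_replicate]
  have hlen1 : g1.length = 2 * R - 1 := by rw [hg1, wfold_length]; exact hlen0
  have hlen2 : g2.length = 2 * R - 1 := by rw [hg2, wfold_length]; exact hlen1
  have hlen3 : g3.length = 2 * R - 1 := by rw [hg3, wfold_length]; exact hlen2
  have hrlen0 : pvRlen g0 r = 2 * C - 1 := by
    rw [hg0]; unfold pvRlen; rw [List.getD_replicate _ hr]; exact List.length_replicate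
  have hrlen1 : pvRlen g1 r = 2 * C - 1 := by rw [hg1, wfold_rlen]; exact hrlen0
  have hrlen2 : pvRlen g2 r = 2 * C - 1 := by rw [hg2, wfold_rlen]; exact hrlen1
  have hrlen3 : pvRlen g3 r = 2 * C - 1 := by rw [hg3, wfold_rlen]; exact hrlen2
  rcases Nat.mod_two_eq_zero_or_one r with hrp | hrp <;>
    rcases Nat.mod_two_eq_zero_or_one c with hcp | hcp
  · -- r even, c even: written by pass 1, untouched by passes 2-4
    have hno4 : (r, c) ∉ pvPairs (R - 1) C (fun i => 1 + 2 * i) (fun j => 2 * j) := by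
      rw [mem_pairs]; rintro ⟨i, hi, j, hj, h1, h2⟩; omega
    have hno3 : (r, c) ∉ pvPairs R (C - 1) (fun i => 2 * i) (fun j => 1 + 2 * j) := by
      rw [mem_pairs]; rintro ⟨i, hi, j, hj, h1, h2⟩; omega
    have hno2 : (r, c) ∉ pvPairs (R - 1) (C - 1) (fun i => 1 + 2 * i) (fun j => 1 + 2 * j) := by
      rw [mem_pairs]; rintro ⟨i, hi, j, hj, h1, h2⟩; omega
    have hm1 : (r, c) ∈ pvPairs R C (fun i => 2 * i) (fun j => 2 * j) := by
      rw [mem_pairs]; exact ⟨r / 2, by omega, c / 2, by omega, by omega, by omega⟩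
    rw [wfold_not_mem _ _ _ _ _ hno4, wfold_not_mem _ _ _ _ _ hno3,
      wfold_not_mem _ _ _ _ _ hno2,
      wfold_mem _ _ _ _ _ hm1 (by rw [hlen0]; exact hr) (by rw [hrlen0]; exact hc)]
    simp [pvV1, pvCell, hrp, hcp]
  · -- r even, c odd: written by pass 3, untouched by pass 4
    have hno4 : (r, c) ∉ pvPairs (R - 1) C (fun i => 1 + 2 * i) (fun j => 2 * j) := by
      rw [mem_pairs]; rintro ⟨i, hi, j, hj, h1, h2⟩; omega
    have hm3 : (r, c) ∈ pvPairs R (C - 1) (fun i => 2 * i) (fun j => 1 + 2 * j) := by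
      rw [mem_pairs]; exact ⟨r / 2, by omega, (c - 1) / 2, by omega, by omega, by omega⟩
    rw [wfold_not_mem _ _ _ _ _ hno4,
      wfold_mem _ _ _ _ _ hm3 (by rw [hlen2]; exact hr) (by rw [hrlen2]; exact hc)]
    simp [pvV3, pvCell, check_horizontal, hconn, hrp, hcp]
  · -- r odd, c even: written by pass 4
    have hm4 : (r, c) ∈ pvPairs (R - 1) C (fun i => 1 + 2 * i) (fun j => 2 * j) := by
      rw [mem_pairs]; exact ⟨(r - 1) / 2, by omega, c / 2, by omega, by omega, by omega⟩
    rw [wfold_mem _ _ _ _ _ hm4 (by rw [hlen3]; exact hr) (by rw [hrlen3]; exact hc)]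
    simp [pvV4, pvCell, check_vertical, vconn, hrp, hcp]
  · -- r odd, c odd: written by pass 2, untouched by passes 3-4
    have hno4 : (r, c) ∉ pvPairs (R - 1) C (fun i => 1 + 2 * i) (fun j => 2 * j) := by
      rw [mem_pairs]; rintro ⟨i, hi, j, hj, h1, h2⟩; omega
    have hno3 : (r, c) ∉ pvPairs R (C - 1) (fun i => 2 * i) (fun j => 1 + 2 * j) := by
      rw [mem_pairs]; rintro ⟨i, hi, j, hj, h1, h2⟩; omega
    have hm2 : (r, c) ∈ pvPairs (R - 1) (C - 1) (fun i => 1 + 2 * i) (fun j => 1 + 2 * j) := by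
      rw [mem_pairs]; exact ⟨(r - 1) / 2, by omega, (c - 1) / 2, by omega, by omega, by omega⟩
    rw [wfold_not_mem _ _ _ _ _ hno4, wfold_not_mem _ _ _ _ _ hno3,
      wfold_mem _ _ _ _ _ hm2 (by rw [hlen1]; exact hr) (by rw [hrlen1]; exact hc)]
    simp [pvCell, hrp, hcp]

lemma final_length (sketch : List (List String)) (h : Pre_extend_sketch sketch) :
    (extend_sketch sketch).length = 2 * sketch.length - 1 := by
  rw [extend_sketch_eq_wfold sketch h]
  simp [wfold_length]

lemma final_rlen (sketch : List (List String)) (h : Pre_extend_sketch sketch) (r : Nat)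
    (hr : r < 2 * sketch.length - 1) :
    pvRlen (extend_sketch sketch) r = 2 * (sketch.headD []).length - 1 := by
  rw [extend_sketch_eq_wfold sketch h]
  simp only [wfold_rlen]
  simp [pvRlen, List.getD, hr]

-- ---------- B-side characterisation ----------

lemma expandRow_flat (row : List String) :
    expandRow row = [row.headD ""]
      ++ (row.zip row.tail).flatMap (fun p => [hconn p.1 p.2, p.2]) := by
  simp [expandRow, List.flatMap_def]

lemma expandRow_cons2 (a b : String) (l : List String) :
    expandRow (a :: b :: l) = a :: hconn a b :: expandRow (b :: l) := by
  simp [expandRow_flat]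

lemma expandRow_spec (row : List String) (a : String) :
    (expandRow (a :: row)).length = 2 * row.length + 1 ∧
    ∀ c < 2 * row.length + 1,
      (expandRow (a :: row)).getD c "" =
        if c % 2 = 0 then (a :: row).getD (c / 2) ""
        else hconn ((a :: row).getD (c / 2) "") ((a :: row).getD (c / 2 + 1) "") := by
  induction row generalizing a with
  | nil =>
    refine ⟨by simp [expandRow], ?_⟩
    intro c hc
    have hc0 : c = 0 := by simp at hc; omega
    subst hc0
    simp [expandRow]
  | cons b l ih =>
    obtain ⟨ihl, ihe⟩ := ih b
    rw [expandRow_cons2]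
    refine ⟨by simp [ihl]; omega, ?_⟩
    intro c hc
    match c with
    | 0 => simp
    | 1 => simp
    | (k + 2) =>
      have hk : k < 2 * l.length + 1 := by simp at hc; omega
      have : (a :: hconn a b :: expandRow (b :: l)).getD (k + 2) ""
          = (expandRow (b :: l)).getD k "" := by simp [List.getD]
      rw [this, ihe k hk]
      have h2 : (k + 2) % 2 = k % 2 := by omega
      have h3 : (k + 2) / 2 = k / 2 + 1 := by omega
      rcases Nat.mod_two_eq_zero_or_one k with hp | hp <;>
        simp [h2, h3, hp, List.getD]

lemma linkRows_cons2 (t b t' b' : String) (ts bs : List String) :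
    linkRows (t :: t' :: ts) (b :: b' :: bs)
      = vconn t b :: "." :: linkRows (t' :: ts) (b' :: bs) := by
  simp [linkRows]

lemma linkRows_spec (top : List String) :
    ∀ (bot : List String) (t b : String), top.length = bot.length →
    (linkRows (t :: top) (b :: bot)).length = 2 * top.length + 1 ∧
    ∀ c < 2 * top.length + 1,
      (linkRows (t :: top) (b :: bot)).getD c "" =
        if c % 2 = 0 then vconn ((t :: top).getD (c / 2) "") ((b :: bot).getD (c / 2) "")
        else "." := by
  induction top with
  | nil =>
    rintro (_ | ⟨b', bs⟩) t b hlen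
    · refine ⟨by simp [linkRows], ?_⟩
      intro c hc
      have hc0 : c = 0 := by simp at hc; omega
      subst hc0
      simp [linkRows]
    · simp at hlen
  | cons t' ts ih =>
    rintro (_ | ⟨b', bs⟩) t b hlen
    · simp at hlen
    · simp only [List.length_cons, Nat.add_right_cancel_iff] at hlen
      obtain ⟨ihl, ihe⟩ := ih bs t' b' hlen
      rw [linkRows_cons2]
      refine ⟨by simp [ihl]; omega, ?_⟩
      intro c hc
      match c with
      | 0 => simp
      | 1 => simp
      | (k + 2) =>
        have hk : k < 2 * ts.length + 1 := by simp at hc; omega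
        have : (vconn t b :: "." :: linkRows (t' :: ts) (b' :: bs)).getD (k + 2) ""
            = (linkRows (t' :: ts) (b' :: bs)).getD k "" := by simp [List.getD]
        rw [this, ihe k hk]
        have h2 : (k + 2) % 2 = k % 2 := by omega
        have h3 : (k + 2) / 2 = k / 2 + 1 := by omega
        rcases Nat.mod_two_eq_zero_or_one k with hp | hp <;>
          simp [h2, h3, hp, List.getD]

lemma alt_cons2 (r0 r1 : List String) (rs : List (List String)) :
    extend_sketch_alt (r0 :: r1 :: rs)
      = expandRow r0 :: linkRows r0 r1 :: extend_sketch_alt (r1 :: rs) := by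
  simp [extend_sketch_alt]

lemma alt_spec (s : List (List String)) (r0 : List String) :
    (extend_sketch_alt (r0 :: s)).length = 2 * s.length + 1 ∧
    ∀ i < 2 * s.length + 1,
      (extend_sketch_alt (r0 :: s)).getD i [] =
        if i % 2 = 0 then expandRow ((r0 :: s).getD (i / 2) [])
        else linkRows ((r0 :: s).getD (i / 2) []) ((r0 :: s).getD (i / 2 + 1) []) := by
  induction s generalizing r0 with
  | nil =>
    refine ⟨by simp [extend_sketch_alt], ?_⟩
    intro i hi
    have hi0 : i = 0 := by simp at hi; omega
    subst hi0
    simp [extend_sketch_alt]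
  | cons r1 rs ih =>
    obtain ⟨ihl, ihe⟩ := ih r1
    rw [alt_cons2]
    refine ⟨by simp [ihl]; omega, ?_⟩
    intro i hi
    match i with
    | 0 => simp
    | 1 => simp
    | (k + 2) =>
      have hk : k < 2 * rs.length + 1 := by simp at hi; omega
      have : (expandRow r0 :: linkRows r0 r1 :: extend_sketch_alt (r1 :: rs)).getD (k + 2) []
          = (extend_sketch_alt (r1 :: rs)).getD k [] := by simp [List.getD]
      rw [this, ihe k hk]
      have h2 : (k + 2) % 2 = k % 2 := by omega
      have h3 : (k + 2) / 2 = k / 2 + 1 := by omega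
      rcases Nat.mod_two_eq_zero_or_one k with hp | hp <;>
        simp [h2, h3, hp, List.getD]

-- row i/2 of the sketch as a nonempty list, under Pre_
lemma row_nonempty (sketch : List (List String)) (h : Pre_extend_sketch sketch)
    (k : Nat) (hk : k < sketch.length) :
    (sketch.getD k []).length = (sketch.headD []).length ∧ sketch.getD k [] ≠ [] := by
  have hl : (sketch.getD k []).length = (sketch.headD []).length := by
    rw [List.getD_eq_getElem _ _ hk]; exact h.2.2 _ (List.getElem_mem hk)
  exact ⟨hl, fun hnil => h.2.1 (by rw [← hl, hnil]; rfl)⟩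

lemma alt_length (sketch : List (List String)) (h : Pre_extend_sketch sketch) :
    (extend_sketch_alt sketch).length = 2 * sketch.length - 1 := by
  obtain ⟨r0, s, rfl⟩ := List.exists_cons_of_ne_nil h.1
  have := (alt_spec s r0).1
  simp [this]; omega

lemma alt_row (sketch : List (List String)) (h : Pre_extend_sketch sketch) (i : Nat)
    (hi : i < 2 * sketch.length - 1) :
    (extend_sketch_alt sketch).getD i [] =
      if i % 2 = 0 then expandRow (sketch.getD (i / 2) [])
      else linkRows (sketch.getD (i / 2) []) (sketch.getD (i / 2 + 1) []) := by
  obtain ⟨r0, s, rfl⟩ := List.exists_cons_of_ne_nil h.1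
  exact (alt_spec s r0).2 i (by simp at hi ⊢; omega)

lemma alt_rlen (sketch : List (List String)) (h : Pre_extend_sketch sketch) (i : Nat)
    (hi : i < 2 * sketch.length - 1) :
    pvRlen (extend_sketch_alt sketch) i = 2 * (sketch.headD []).length - 1 := by
  unfold pvRlen
  rw [alt_row sketch h i hi]
  have hC0 : 0 < (sketch.headD []).length := Nat.pos_of_ne_zero h.2.1
  split_ifs with hp
  · have hk : i / 2 < sketch.length := by omega
    obtain ⟨hl, hne⟩ := row_nonempty sketch h (i / 2) hk
    obtain ⟨a, row, heq⟩ := List.exists_cons_of_ne_nil hne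
    rw [heq, List.length_cons] at hl
    rw [heq, (expandRow_spec row a).1]
    omega
  · have hk1 : i / 2 + 1 < sketch.length := by omega
    have hk : i / 2 < sketch.length := by omega
    obtain ⟨hl, hne⟩ := row_nonempty sketch h (i / 2) hk
    obtain ⟨hl', hne'⟩ := row_nonempty sketch h (i / 2 + 1) hk1
    obtain ⟨a, row, heq⟩ := List.exists_cons_of_ne_nil hne
    obtain ⟨a', row', heq'⟩ := List.exists_cons_of_ne_nil hne'
    rw [heq, List.length_cons] at hl
    rw [heq', List.length_cons] at hl'
    rw [heq, heq', (linkRows_spec row row' a a' (by omega)).1]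
    omega

lemma alt_get (sketch : List (List String)) (h : Pre_extend_sketch sketch) (r c : Nat)
    (hr : r < 2 * sketch.length - 1) (hc : c < 2 * (sketch.headD []).length - 1) :
    pvGet2 (extend_sketch_alt sketch) r c = pvCell sketch r c := by
  unfold pvGet2
  rw [alt_row sketch h r hr]
  have hC0 : 0 < (sketch.headD []).length := Nat.pos_of_ne_zero h.2.1
  rcases Nat.mod_two_eq_zero_or_one r with hrp | hrp
  · rw [if_pos hrp]
    have hk : r / 2 < sketch.length := by omega
    obtain ⟨hl, hne⟩ := row_nonempty sketch h (r / 2) hk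
    obtain ⟨a, row, heq⟩ := List.exists_cons_of_ne_nil hne
    rw [heq, List.length_cons] at hl
    rw [heq, (expandRow_spec row a).2 c (by omega)]
    rw [List.getD_eq_getElem?_getD] at heq
    simp [pvCell, pvGet2, hrp, heq]
  · rw [if_neg (by omega)]
    have hk1 : r / 2 + 1 < sketch.length := by omega
    have hk : r / 2 < sketch.length := by omega
    obtain ⟨hl, hne⟩ := row_nonempty sketch h (r / 2) hk
    obtain ⟨hl', hne'⟩ := row_nonempty sketch h (r / 2 + 1) hk1
    obtain ⟨a, row, heq⟩ := List.exists_cons_of_ne_nil hne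
    obtain ⟨a', row', heq'⟩ := List.exists_cons_of_ne_nil hne'
    rw [heq, List.length_cons] at hl
    rw [heq', List.length_cons] at hl'
    rw [heq, heq', (linkRows_spec row row' a a' (by omega)).2 c (by omega)]
    rw [List.getD_eq_getElem?_getD] at heq heq'
    simp [pvCell, pvGet2, hrp, heq, heq']

-- ===== VERDICT (by name: the statement is the Claim_ definition above) =====
theorem extend_sketch_spec : Claim_equal_extend_sketch := by
  intro sketch _ hpre
  unfold Spec_extend_sketch
  apply List.ext_getElem
  · rw [final_length sketch hpre, alt_length sketch hpre]
  · intro i hi1 hi2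
    have hi' : i < 2 * sketch.length - 1 := by
      rw [← final_length sketch hpre]; exact hi1
    have hrowA : (extend_sketch sketch)[i].length = 2 * (sketch.headD []).length - 1 := by
      have hrl := final_rlen sketch hpre i hi'
      unfold pvRlen at hrl
      rwa [List.getD_eq_getElem _ _ hi1] at hrl
    have hrowB : (extend_sketch_alt sketch)[i].length = 2 * (sketch.headD []).length - 1 := by
      have hrl := alt_rlen sketch hpre i hi'
      unfold pvRlen at hrl
      rwa [List.getD_eq_getElem _ _ hi2] at hrl
    apply List.ext_getElem
    · rw [hrowA, hrowB]
    · intro j hj1 hj2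
      have hj' : j < 2 * (sketch.headD []).length - 1 := by rw [← hrowA]; exact hj1
      have hA := gget_final sketch hpre i j hi' hj'
      have hB := alt_get sketch hpre i j hi' hj'
      unfold pvGet2 at hA hB
      rw [List.getD_eq_getElem _ _ hi1, List.getD_eq_getElem _ _ hj1] at hA
      rw [List.getD_eq_getElem _ _ hi2, List.getD_eq_getElem _ _ hj2] at hB
      rw [hA, hB]
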